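-- pv_equiv track=rewrite | github.com/pypi-data/pypi-mirror-370 | packages/qaravan/qaravan-0.1.57-py3-none-any.whl/qaravan/applications/compilation.py | brickwall_skeleton
-- ===== SOURCE A (Python) =====
-- def brickwall_skeleton(n, num_layers):
--     skeleton = []
--     for _ in range(num_layers):
--         for i in range(n//2):
--             skeleton.append((2*i,2*i+1))
--         for i in range((n+1)//2 -1):
--             skeleton.append((2*i+1,2*i+2))
--     return skeleton
-- ===== SOURCE B (Python) =====
-- def brickwall_skeleton(n, num_layers):
--     # Flat closed-form construction: the k-th gate of the whole circuit is
--     # computed directly from k by index arithmetic (position within its layer),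
--     # instead of nesting per-layer loops.
--     per = n - 1 if n > 1 else 0          # gates per layer
--     half = n // 2                        # even-pair gates per layer
--     total = per * num_layers if num_layers > 0 else 0
--     def gate(k):
--         j = k % per                      # position inside the layer
--         if j < half:
--             return (2*j, 2*j + 1)
--         t = j - half
--         return (2*t + 1, 2*t + 2)
--     return [gate(k) for k in range(total)]
-- ===== Notes on version B (the rewrite author's own statement) =====
-- stated objective: alternative
-- what changed: B replaces A's nested per-layer append loops by a single flat comprehension that computes the k-th gate of the whole circuit in closed form from the index k (k % (n-1) locates the position inside the layer and an arithmetic branch yields the even or odd pair).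
import Mathlib
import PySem

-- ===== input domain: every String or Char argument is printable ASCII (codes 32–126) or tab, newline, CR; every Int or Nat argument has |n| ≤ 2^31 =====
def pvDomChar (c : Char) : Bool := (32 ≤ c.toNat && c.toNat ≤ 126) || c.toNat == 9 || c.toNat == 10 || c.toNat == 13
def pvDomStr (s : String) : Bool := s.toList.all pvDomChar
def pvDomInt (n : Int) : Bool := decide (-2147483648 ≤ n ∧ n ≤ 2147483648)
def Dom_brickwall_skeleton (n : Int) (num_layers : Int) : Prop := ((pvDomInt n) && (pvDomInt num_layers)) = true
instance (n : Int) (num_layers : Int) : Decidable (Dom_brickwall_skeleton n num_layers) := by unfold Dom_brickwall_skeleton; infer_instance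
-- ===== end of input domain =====

-- B computes the k-th gate of the whole circuit directly from the flat index k by
-- closed-form index arithmetic (position within its layer), instead of A's nested
-- per-layer append loops; objective: alternative decomposition.

-- ===== PORT A =====
def brickwall_skeleton (n : Int) (num_layers : Int) : List (Int × Int) :=
  (PySem.List.pyRange 0 num_layers 1).foldl (fun sk _ =>
    let sk := (PySem.List.pyRange 0 (PySem.Int.floordiv n 2) 1).foldl
      (fun s i => s ++ [(2*i, 2*i+1)]) sk
    (PySem.List.pyRange 0 (PySem.Int.floordiv (n+1) 2 - 1) 1).foldl
      (fun s i => s ++ [(2*i+1, 2*i+2)]) sk) []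

-- ===== PORT B =====
-- gate(k) of Source B: k's position inside its layer decides even or odd pair
def bw_gate (per half : Int) (k : Int) : Int × Int :=
  let j := PySem.Int.mod k per
  if j < half then (2*j, 2*j + 1)
  else
    let t := j - half
    (2*t + 1, 2*t + 2)

def brickwall_skeleton_alt (n : Int) (num_layers : Int) : List (Int × Int) :=
  let per := if 1 < n then n - 1 else 0
  let half := PySem.Int.floordiv n 2
  let total := if 0 < num_layers then per * num_layers else 0
  (PySem.List.pyRange 0 total 1).map (bw_gate per half)

-- ===== PRECONDITION & SPEC =====
def Spec_brickwall_skeleton (n : Int) (num_layers : Int) (out : List (Int × Int)) : Prop := out = brickwall_skeleton_alt n num_layers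
instance (n : Int) (num_layers : Int) (out : List (Int × Int)) : Decidable (Spec_brickwall_skeleton n num_layers out) := by unfold Spec_brickwall_skeleton; infer_instance

-- ===== CLAIM (what is proved, stated in full; the proofs are below) =====
def Claim_equal_brickwall_skeleton : Prop := ∀ (n : Int) (num_layers : Int), Dom_brickwall_skeleton n num_layers → Spec_brickwall_skeleton n num_layers (brickwall_skeleton n num_layers)

-- ===== LEMMAS AND PROOFS =====

-- one layer of A's output, as A builds it
def pvLayer (n : Int) : List (Int × Int) :=
  ((PySem.List.pyRange 0 (PySem.Int.floordiv n 2) 1).map (fun i => (2*i, 2*i+1)))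
    ++ ((PySem.List.pyRange 0 (PySem.Int.floordiv (n+1) 2 - 1) 1).map (fun i => (2*i+1, 2*i+2)))

theorem pv_foldl_append_map {α β : Type} (f : α → β) (l : List α) (acc : List β) :
    l.foldl (fun s i => s ++ [f i]) acc = acc ++ l.map f := by
  induction l generalizing acc with
  | nil => simp
  | cons a t ih => simp [List.foldl, ih, List.append_assoc]

theorem pv_foldl_const_append {α β : Type} (L : List β) (l : List α) (acc : List β) :
    l.foldl (fun s _ => s ++ L) acc = acc ++ (List.replicate l.length L).flatten := by
  induction l generalizing acc with
  | nil => simp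
  | cons a t ih => simp [List.foldl, ih, List.append_assoc, List.replicate_succ]

-- A flattens to replicated layers (for every num_layers; toNat of a negative is 0)
theorem pv_A_flat (n m : Int) :
    brickwall_skeleton n m = (List.replicate m.toNat (pvLayer n)).flatten := by
  unfold brickwall_skeleton
  have hbody : ∀ sk : List (Int × Int),
      ((PySem.List.pyRange 0 (PySem.Int.floordiv (n+1) 2 - 1) 1).foldl
        (fun s i => s ++ [(2*i+1, 2*i+2)])
        ((PySem.List.pyRange 0 (PySem.Int.floordiv n 2) 1).foldl
          (fun s i => s ++ [(2*i, 2*i+1)]) sk))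
      = sk ++ pvLayer n := by
    intro sk
    rw [pv_foldl_append_map, pv_foldl_append_map, List.append_assoc]; rfl
  simp only [hbody]
  rw [pv_foldl_const_append, PySem.List.length_pyRange_one]
  simp

theorem bw_gate_congr (per half a b : Int) (h : PySem.Int.mod a per = PySem.Int.mod b per) :
    bw_gate per half a = bw_gate per half b := by
  unfold bw_gate; rw [h]

-- one block of B's flat map is exactly A's layer (for n ≥ 2)
theorem pv_map_gate_layer (n : Int) (hn : 2 ≤ n) :
    (PySem.List.pyRange 0 (n-1) 1).map (bw_gate (n-1) (PySem.Int.floordiv n 2)) = pvLayer n := by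
  have hfd : PySem.Int.floordiv n 2 = n / 2 := PySem.Int.floordiv_eq_ediv_of_pos (by norm_num)
  have hfd2 : PySem.Int.floordiv (n+1) 2 = (n+1) / 2 := PySem.Int.floordiv_eq_ediv_of_pos (by norm_num)
  unfold pvLayer
  rw [hfd, hfd2]
  have h0 : (0:Int) ≤ n / 2 := by omega
  have h1 : n / 2 ≤ n - 1 := by omega
  rw [PySem.List.pyRange_one_append 0 (n/2) (n-1) h0 h1, List.map_append]
  congr 1
  · apply List.map_congr_left
    intro j hj
    rw [PySem.List.mem_pyRange_one] at hj
    unfold bw_gate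
    rw [PySem.Int.mod_eq_emod_of_pos (by omega), Int.emod_eq_of_lt (by omega) (by omega)]
    simp only [if_pos (by omega : j < n / 2)]
  · have he : (n+1)/2 - 1 = (n-1) - n/2 := by omega
    rw [he, PySem.List.pyRange_one (a := n/2) (b := n-1), PySem.List.pyRange_one (a := 0) (b := n-1-(n/2))]
    have hlen : (n - 1 - n/2 - 0) = n - 1 - n/2 := by ring
    rw [hlen, List.map_map, List.map_map]
    apply List.map_congr_left
    intro k hk
    rw [List.mem_range] at hk
    have hkI : (k:Int) < n - 1 - n/2 := by omega
    simp only [Function.comp]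
    unfold bw_gate
    rw [PySem.Int.mod_eq_emod_of_pos (by omega), Int.emod_eq_of_lt (by omega) (by omega)]
    simp only [if_neg (by omega : ¬ (n/2 + (k:Int) < n / 2))]
    have hsub : n/2 + (k:Int) - n/2 = 0 + (k:Int) := by ring
    rw [hsub]

-- B's flat map over per*m indices splits into m identical blocks
theorem pv_map_gate_blocks (per half : Int) (hper : 0 < per) (m : Nat) :
    (PySem.List.pyRange 0 (per * (m:Int)) 1).map (bw_gate per half)
      = (List.replicate m ((PySem.List.pyRange 0 per 1).map (bw_gate per half))).flatten := by
  induction m with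
  | zero => simp [PySem.List.pyRange_one_eq_nil]
  | succ m ih =>
    have hcast : per * ((m+1 : Nat) : Int) = per * (m:Int) + per := by push_cast; ring
    have h0 : (0:Int) ≤ per * (m:Int) := by positivity
    have h1 : per * (m:Int) ≤ per * (m:Int) + per := by omega
    rw [hcast, PySem.List.pyRange_one_append 0 (per * (m:Int)) (per * (m:Int) + per) h0 h1,
      List.map_append, ih, List.replicate_succ', List.flatten_append,
      List.flatten_cons, List.flatten_nil, List.append_nil]
    congr 1
    rw [PySem.List.pyRange_one (a := per * (m:Int)) (b := per * (m:Int) + per),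
      PySem.List.pyRange_one (a := 0) (b := per)]
    have : per * (m:Int) + per - per * (m:Int) = per := by ring
    rw [this, List.map_map, List.map_map]
    simp only [sub_zero]
    apply List.map_congr_left
    intro k _
    simp only [Function.comp]
    apply bw_gate_congr
    rw [PySem.Int.mod_eq_emod_of_pos hper, PySem.Int.mod_eq_emod_of_pos hper]
    have : per * (m:Int) + (k:Int) = (k:Int) + per * (m:Int) := by ring
    rw [this, Int.add_mul_emod_self_left]
    norm_num

-- ===== VERDICT (by name: the statement is the Claim_ definition above) =====
theorem brickwall_skeleton_spec : Claim_equal_brickwall_skeleton := by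
  intro n m _
  unfold Spec_brickwall_skeleton
  rw [pv_A_flat]
  unfold brickwall_skeleton_alt
  by_cases hm : 0 < m
  · by_cases hn : 1 < n
    · simp only [if_pos hm, if_pos hn]
      have hmn : (n-1) * m = (n-1) * ((m.toNat : Int)) := by
        rw [Int.toNat_of_nonneg hm.le]
      rw [hmn, pv_map_gate_blocks (n-1) (PySem.Int.floordiv n 2) (by omega) m.toNat,
        pv_map_gate_layer n (by omega)]
    · simp only [if_pos hm, if_neg hn, zero_mul]
      rw [PySem.List.pyRange_one_eq_nil le_rfl]
      have hl : pvLayer n = [] := by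
        unfold pvLayer
        have hfd : PySem.Int.floordiv n 2 = n / 2 := PySem.Int.floordiv_eq_ediv_of_pos (by norm_num)
        have hfd2 : PySem.Int.floordiv (n+1) 2 = (n+1) / 2 := PySem.Int.floordiv_eq_ediv_of_pos (by norm_num)
        rw [hfd, hfd2, PySem.List.pyRange_one_eq_nil (by omega), PySem.List.pyRange_one_eq_nil (by omega)]
        simp
      rw [hl]
      simp
  · simp only [if_neg hm]
    rw [PySem.List.pyRange_one_eq_nil le_rfl]
    have : m.toNat = 0 := by omega
    rw [this]
    simp
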